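-- pv_equiv track=rewrite | github.com/yoonseokham/algorithm | Baekjoon/BOJ12851.py | BFS
-- ===== SOURCE A (Python) =====
-- from collections import deque
--
-- MAX =(100001)
--
-- def BFS(start,end):
--     dp = [ [0,0] for i in range(MAX)]
--     dp[start]=[1,1]
--     q=deque([start])
--     while q :
--         curLocation=q.popleft()
--         for i in [-1,1,curLocation]:
--             newLocation=curLocation+i
--             if dp[end][0]!=0 and dp[end][0]<dp[curLocation][0]: continue
--             if 0<= newLocation and newLocation<MAX and ( dp[newLocation][1]==0 or dp[newLocation][0]==dp[curLocation][0]+1 ):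
--                 dp[newLocation][0]=dp[curLocation][0]+1
--                 dp[newLocation][1]+=1
--                 q.append(newLocation)
--     return dp[end]
-- ===== SOURCE B (Python) =====
-- MAX = 100001
--
-- def BFS(start, end):
--     dist = [0] * MAX
--     cnt = [0] * MAX
--     dist[start] = 1
--     cnt[start] = 1
--     frontier = [start]
--     d = 1
--     while frontier and dist[end] == 0:
--         nxt = []
--         for node in frontier:
--             for n in (node - 1, node + 1, 2 * node):
--                 if 0 <= n < MAX:
--                     if dist[n] == 0:
--                         dist[n] = d + 1
--                         cnt[n] = cnt[node]
--                         nxt.append(n)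
--                     elif dist[n] == d + 1:
--                         cnt[n] += cnt[node]
--         frontier = nxt
--         d += 1
--     return [dist[end], cnt[end]]
-- ===== Notes on version B (the rewrite author's own statement) =====
-- stated objective: faster
-- what changed: A's multi-enqueue BFS (each node re-enqueued once per shortest path, counts grown by +1, plus one fully expanded extra layer after the target is found) is replaced by a layered enqueue-once BFS that visits each cell at most once per layer and accumulates parent path-counts (cnt[n] += cnt[node]), stopping as soon as dist[end] is set.
import Mathlib
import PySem

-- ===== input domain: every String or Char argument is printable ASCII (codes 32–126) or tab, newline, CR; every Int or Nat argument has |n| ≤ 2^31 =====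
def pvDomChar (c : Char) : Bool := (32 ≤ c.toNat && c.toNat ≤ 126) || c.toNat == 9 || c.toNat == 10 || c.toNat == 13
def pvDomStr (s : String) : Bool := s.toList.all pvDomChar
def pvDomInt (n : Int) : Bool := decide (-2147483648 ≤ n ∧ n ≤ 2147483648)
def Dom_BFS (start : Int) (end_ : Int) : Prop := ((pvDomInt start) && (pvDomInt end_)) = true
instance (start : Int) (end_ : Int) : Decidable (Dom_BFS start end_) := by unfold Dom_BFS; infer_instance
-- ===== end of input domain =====

-- B is a layered enqueue-once BFS accumulating parent path-counts; A re-enqueues each node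
-- once per shortest path (unit increments) and expands one extra pruned layer. Same return value.

-- Python list index with negative wraparound (all admitted indices are in range: see Pre_BFS)
def pvCell (i : Int) : Nat := (if i < 0 then 100001 + i else i).toNat

-- ===== PORT A =====
-- one candidate move i of A's inner `for i in [-1,1,curLocation]` loop; pushes appends in front
-- of the reversed queue tail (deque modelled as front list + reversed back list)
def pvAexpand (end_ cur : Int) (st : Array (Int × Int) × List Int) (i : Int) :
    Array (Int × Int) × List Int :=
  let dp := st.1
  let newLocation := cur + i
  if (dp.getD (pvCell end_) (0,0)).1 ≠ 0 ∧
     (dp.getD (pvCell end_) (0,0)).1 < (dp.getD (pvCell cur) (0,0)).1 then st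
  else if 0 ≤ newLocation ∧ newLocation < 100001 ∧
       ((dp.getD (pvCell newLocation) (0,0)).2 = 0 ∨
        (dp.getD (pvCell newLocation) (0,0)).1 = (dp.getD (pvCell cur) (0,0)).1 + 1) then
    (dp.setIfInBounds (pvCell newLocation)
        ((dp.getD (pvCell cur) (0,0)).1 + 1, (dp.getD (pvCell newLocation) (0,0)).2 + 1),
     newLocation :: st.2)
  else st

-- A's `while q` loop; fuel is only a totality guard (proved never to run out on Pre_BFS)
def pvAloop (fuel : Nat) (end_ : Int) (front rback : List Int) (dp : Array (Int × Int)) :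
    Array (Int × Int) :=
  match front with
  | cur :: front' =>
    match fuel with
    | 0 => dp
    | f+1 =>
      let s := [(-1 : Int), 1, cur].foldl (pvAexpand end_ cur) (dp, rback)
      pvAloop f end_ front' s.2 s.1
  | [] => if rback = [] then dp else pvAloop fuel end_ rback.reverse [] dp
termination_by (fuel, rback.length)
decreasing_by
  · exact Prod.Lex.left _ _ (Nat.lt_succ_self _)
  · rename_i h; exact Prod.Lex.right _ (by simpa using List.length_pos_iff.mpr h)

def BFS (start : Int) (end_ : Int) : List Int :=
  let dp := (Array.replicate 100001 ((0 : Int), (0 : Int))).setIfInBounds (pvCell start) (1, 1)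
  let dp := pvAloop (1 <<< 200100) end_ [start] [] dp
  [(dp.getD (pvCell end_) (0,0)).1, (dp.getD (pvCell end_) (0,0)).2]

-- ===== PORT B =====
-- B's body for one move n of one frontier node: enqueue-once, count accumulation
def pvBinner (d node : Int) (st : Array Int × Array Int × List Int) (n : Int) :
    Array Int × Array Int × List Int :=
  let dist := st.1; let cnt := st.2.1; let rnxt := st.2.2
  if 0 ≤ n ∧ n < 100001 then
    if dist.getD (pvCell n) 0 = 0 then
      (dist.setIfInBounds (pvCell n) (d+1), cnt.setIfInBounds (pvCell n) (cnt.getD (pvCell node) 0), n :: rnxt)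
    else if dist.getD (pvCell n) 0 = d + 1 then
      (dist, cnt.setIfInBounds (pvCell n) (cnt.getD (pvCell n) 0 + cnt.getD (pvCell node) 0), rnxt)
    else st
  else st

-- B's body for one frontier node: the three moves
def pvBstep (d : Int) (st : Array Int × Array Int × List Int) (node : Int) :
    Array Int × Array Int × List Int :=
  [node - 1, node + 1, 2 * node].foldl (pvBinner d node) st

-- B's `while frontier and dist[end] == 0` loop, one layer per iteration
def pvBloop (fuel : Nat) (end_ : Int) (frontier : List Int) (d : Int) (dist cnt : Array Int) :
    List Int :=
  match fuel with
  | 0 => [dist.getD (pvCell end_) 0, cnt.getD (pvCell end_) 0]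
  | f+1 =>
    if frontier = [] ∨ dist.getD (pvCell end_) 0 ≠ 0 then
      [dist.getD (pvCell end_) 0, cnt.getD (pvCell end_) 0]
    else
      let s := frontier.foldl (pvBstep d) (dist, cnt, [])
      pvBloop f end_ s.2.2.reverse (d+1) s.1 s.2.1

def BFS_alt (start : Int) (end_ : Int) : List Int :=
  pvBloop 100003 end_ [start] 1
    ((Array.replicate 100001 (0 : Int)).setIfInBounds (pvCell start) 1)
    ((Array.replicate 100001 (0 : Int)).setIfInBounds (pvCell start) 1)

-- ===== PRECONDITION & SPEC =====
-- Pre_ = the inputs where Python A returns: both indices valid for a list of length 100001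
-- (possibly negative, Python wraparound); outside, A raises IndexError (B raises there too).
def Pre_BFS (start : Int) (end_ : Int) : Prop :=
  -100001 ≤ start ∧ start ≤ 100000 ∧ -100001 ≤ end_ ∧ end_ ≤ 100000
instance (start : Int) (end_ : Int) : Decidable (Pre_BFS start end_) := by
  unfold Pre_BFS; infer_instance
def pvWitness_BFS : Int × Int := (1, 2)

def Spec_BFS (start : Int) (end_ : Int) (out : List Int) : Prop := out = BFS_alt start end_
instance (start : Int) (end_ : Int) (out : List Int) : Decidable (Spec_BFS start end_ out) := by
  unfold Spec_BFS; infer_instance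

-- ===== CLAIM (what is proved, stated in full; the proofs are below) =====
def Claim_equal_BFS : Prop := ∀ (start : Int) (end_ : Int), Dom_BFS start end_ → Pre_BFS start end_ → Spec_BFS start end_ (BFS start end_)

-- ===== LEMMAS AND PROOFS =====

-- abstract layer-start state (D = stored distances, C = stored counts) extended by in-layer hits h
def pvMid (D C : Nat → Int) (h : Nat → Int) (d : Int) : Nat → Int × Int :=
  fun c => (if h c ≠ 0 then d + 1 else D c, C c + h c)

def pvDPinv (dp : Array (Int × Int)) (f : Nat → Int × Int) : Prop :=
  dp.size = 100001 ∧ ∀ c, c < 100001 → dp.getD c (0,0) = f c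

def pvBinv (dist cnt : Array Int) (f : Nat → Int × Int) : Prop :=
  dist.size = 100001 ∧ cnt.size = 100001 ∧
    ∀ c, c < 100001 → (dist.getD c 0, cnt.getD c 0) = f c

-- in-range, still-undiscovered children of a node
def pvOK (D : Nat → Int) (n : Int) : Bool :=
  decide (0 ≤ n) && decide (n < 100001) && decide (D (pvCell n) = 0)

def pvKids (D : Nat → Int) (v : Int) : List Int :=
  [v - 1, v + 1, 2*v].filter (pvOK D)

def pvKC (D : Nat → Int) (v : Int) (c : Nat) : Int :=
  ((pvKids D v).countP (fun n => decide (pvCell n = c)) : Int)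

def pvFlat (D : Nat → Int) (T : List Int) : List Int := T.flatMap (pvKids D)

def pvHCnt (D : Nat → Int) (T : List Int) (c : Nat) : Int :=
  ((pvFlat D T).countP (fun n => decide (pvCell n = c)) : Int)

def pvCtx (D C : Nat → Int) (d : Int) : Prop :=
  1 ≤ d ∧ (∀ c, 0 ≤ D c ∧ D c ≤ d) ∧ (∀ c, D c = 0 ↔ C c = 0) ∧ (∀ c, 0 ≤ C c)

def pvHyp (h : Nat → Int) (D : Nat → Int) : Prop :=
  (∀ c, 0 ≤ h c) ∧ (∀ c, h c ≠ 0 → D c = 0)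

def pvTok (D : Nat → Int) (d v : Int) : Prop :=
  -100001 ≤ v ∧ v < 100001 ∧ D (pvCell v) = d

-- B's pending next-frontier list (reversed), characterised
def pvRnx (D : Nat → Int) (h : Nat → Int) (l : List Int) : Prop :=
  l.Nodup ∧ ∀ u, (u ∈ l ↔ 0 ≤ u ∧ u < 100001 ∧ D (pvCell u) = 0 ∧ h (pvCell u) ≠ 0)

def pvUcount (D : Nat → Int) : Nat :=
  ((List.range 100001).filter (fun c => decide (D c = 0))).length

def pvGeom (l b : Nat) : Nat := ((List.range (b+1)).map (fun j => 3^(l+j))).sum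

lemma pvCell_lt (v : Int) (h1 : -100001 ≤ v) (h2 : v < 100001) : pvCell v < 100001 := by
  unfold pvCell; split <;> omega

lemma pvCell_inj (u v : Int) (hu : 0 ≤ u) (hv : 0 ≤ v) (h : pvCell u = pvCell v) : u = v := by
  unfold pvCell at h; split at h <;> split at h <;> omega

lemma pv_getD_set_self (a : Array (Int × Int)) (i : Nat) (v d : Int × Int) (h : i < a.size) :
    (a.setIfInBounds i v).getD i d = v := by
  simp [Array.getD_eq_getD_getElem?, h]

lemma pv_getD_set_ne (a : Array (Int × Int)) (i j : Nat) (v d : Int × Int) (hne : i ≠ j) :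
    (a.setIfInBounds i v).getD j d = a.getD j d := by
  simp [Array.getD_eq_getD_getElem?, hne]

lemma pv_getD_set_self' (a : Array Int) (i : Nat) (v d : Int) (h : i < a.size) :
    (a.setIfInBounds i v).getD i d = v := by
  simp [Array.getD_eq_getD_getElem?, h]

lemma pv_getD_set_ne' (a : Array Int) (i j : Nat) (v d : Int) (hne : i ≠ j) :
    (a.setIfInBounds i v).getD j d = a.getD j d := by
  simp [Array.getD_eq_getD_getElem?, hne]

lemma pvDPinv_congr (dp : Array (Int × Int)) (f g : Nat → Int × Int)
    (h : ∀ c, c < 100001 → f c = g c) (hf : pvDPinv dp f) : pvDPinv dp g := by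
  exact ⟨hf.1, fun c hc => (hf.2 c hc).trans (h c hc)⟩

lemma pvBinv_congr (dist cnt : Array Int) (f g : Nat → Int × Int)
    (h : ∀ c, c < 100001 → f c = g c) (hf : pvBinv dist cnt f) : pvBinv dist cnt g := by
  exact ⟨hf.1, hf.2.1, fun c hc => (hf.2.2 c hc).trans (h c hc)⟩

-- a flip of the two-list queue (or termination when both are empty)
lemma pvAloop_flip (f : Nat) (e : Int) (rb : List Int) (dp : Array (Int × Int)) :
    pvAloop f e [] rb dp = pvAloop f e rb.reverse [] dp := by
  rw [pvAloop.eq_def]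
  split
  · rename_i h; exact absurd h (by simp)
  · split
    · rename_i h; subst h
      rw [pvAloop.eq_def]; rfl
    · rfl

lemma pvAloop_nil (f : Nat) (e : Int) (dp : Array (Int × Int)) :
    pvAloop f e [] [] dp = dp := by
  rw [pvAloop.eq_def]; rfl


lemma pvDelta_sum : ∀ (F : List Int) (f : Int → Int) (t : Int), F.Nodup → t ∈ F →
    (F.map (fun v => (if v = t then (1:Int) else 0) * f v)).sum = f t := by
  intro F
  induction F with
  | nil => intro f t _ ht; cases ht
  | cons a F ih =>
    intro f t hnd ht
    rw [List.map_cons, List.sum_cons]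
    rcases List.mem_cons.mp ht with h | h
    · subst h
      have haF : t ∉ F := (List.nodup_cons.mp hnd).1
      have hz : ∀ v ∈ F, (if v = t then (1:Int) else 0) * f v = 0 := by
        intro v hv
        have : v ≠ t := fun he => haF (he ▸ hv)
        simp [this]
      rw [List.map_congr_left hz]
      simp
    · have hta : t ≠ a := fun he => (List.nodup_cons.mp hnd).1 (he ▸ h)
      rw [if_neg (fun he => hta he.symm)]
      simp only [zero_mul, zero_add]
      exact ih f t (List.nodup_cons.mp hnd).2 h

-- grouping A's unit hits by parent: queue multiplicities = counts
lemma pvSum_count : ∀ (T F : List Int) (w f : Int → Int), F.Nodup →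
    (∀ v, (T.count v : Int) = if v ∈ F then w v else 0) →
    (T.map f).sum = (F.map (fun v => w v * f v)).sum := by
  intro T
  induction T with
  | nil =>
    intro F w f hnd hcou
    symm
    have hz : ∀ v ∈ F, w v * f v = 0 := by
      intro v hv
      have := hcou v
      simp [List.count_nil, hv] at this
      rw [← this]; ring
    rw [List.map_congr_left hz]
    simp
  | cons t T ih =>
    intro F w f hnd hcou
    have htF : t ∈ F := by
      by_contra hmem
      have := hcou t
      simp [hmem, List.count_cons_self] at this
      omega
    have hcou' : ∀ v, (T.count v : Int) = if v ∈ F then w v - (if v = t then 1 else 0) else 0 := by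
      intro v
      have := hcou v
      rw [List.count_cons] at this
      by_cases hvF : v ∈ F
      · simp only [hvF, if_pos] at this ⊢
        by_cases hvt : v = t
        · subst hvt; simp at this ⊢; push_cast at this; omega
        · simp [hvt] at this ⊢; push_cast at this; omega
      · simp only [hvF, if_neg, if_false] at this ⊢
        by_cases hvt : v = t
        · subst hvt; simp at this; omega
        · simp [hvt] at this; push_cast at this; omega
    have ihT := ih F (fun u => w u - if u = t then 1 else 0) f hnd hcou'
    simp only [List.map_cons, List.sum_cons, ihT]
    have expand : (F.map (fun v => w v * f v)).sum
        = (F.map (fun v => (w v - if v = t then 1 else 0) * f v)).sum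
          + (F.map (fun v => (if v = t then (1:Int) else 0) * f v)).sum := by
      rw [← List.sum_map_add]
      apply congrArg
      apply List.map_congr_left
      intro v _; ring
    rw [expand, pvDelta_sum F f t hnd htF]
    ring

lemma pvRegroup (D C : Nat → Int) (T F : List Int) (c : Nat)
    (hnd : F.Nodup) (hcou : ∀ v, (T.count v : Int) = if v ∈ F then C (pvCell v) else 0) :
    pvHCnt D T c = (F.map (fun v => C (pvCell v) * pvKC D v c)).sum := by
  unfold pvHCnt pvFlat
  rw [List.countP_flatMap]
  have cast1 : ((T.map (List.countP (fun n => decide (pvCell n = c)) ∘ pvKids D)).sum : Int)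
      = (T.map (fun v => pvKC D v c)).sum := by
    rw [Nat.cast_list_sum, List.map_map]
    rfl
  rw [cast1]
  exact pvSum_count T F (fun v => C (pvCell v)) (fun v => pvKC D v c) hnd hcou

lemma pvGeom_succ (l b : Nat) : pvGeom l (b+1) = 3^l + pvGeom (l+1) b := by
  unfold pvGeom
  rw [List.range_succ_eq_map]
  simp only [List.map_cons, List.map_map, List.sum_cons, Nat.add_zero]
  refine congrArg (fun s => 3^l + s) (congrArg List.sum (List.map_congr_left ?_))
  intro j _
  show 3^(l + (j+1)) = 3^(l+1+j)
  exact congrArg (3 ^ ·) (by omega)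

lemma pvGeom_ge (l b : Nat) : 3^l ≤ pvGeom l b := by
  cases b with
  | zero => unfold pvGeom; simp
  | succ b =>
    rw [pvGeom_succ]
    omega

lemma pvGeom_le (l b : Nat) : 2 * pvGeom l b + 3^l = 3^(l+b+1) := by
  induction b generalizing l with
  | zero =>
    unfold pvGeom; simp
    rw [pow_succ]; ring
  | succ b ih =>
    rw [pvGeom_succ]
    have h1 := ih (l+1)
    have h2 : l + (b+1) + 1 = l + 1 + b + 1 := by omega
    rw [h2, ← h1, pow_succ]
    ring
lemma pvFlat_len (D : Nat → Int) (T : List Int) : (pvFlat D T).length ≤ 3 * T.length := by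
  unfold pvFlat
  induction T with
  | nil => simp
  | cons t T ih =>
    rw [List.flatMap_cons]
    have : (pvKids D t).length ≤ 3 := by
      have := List.length_filter_le (pvOK D) [t-1, t+1, 2*t]
      simpa [pvKids] using this
    simp only [List.length_append, List.length_cons]
    have : (pvKids D t).length ≤ 3 := this
    omega


lemma pvOK_iff (D : Nat → Int) (n : Int) :
    pvOK D n = true ↔ (0 ≤ n ∧ n < 100001 ∧ D (pvCell n) = 0) := by
  unfold pvOK; simp [and_assoc]

lemma pvKC_nonneg (D : Nat → Int) (v : Int) (c : Nat) : 0 ≤ pvKC D v c := by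
  unfold pvKC; positivity

lemma pvKC_fresh (D : Nat → Int) (v : Int) (c : Nat) (h : pvKC D v c ≠ 0) : D c = 0 := by
  unfold pvKC at h
  have hpos : 0 < (pvKids D v).countP (fun n => decide (pvCell n = c)) := by
    rcases Nat.eq_zero_or_pos ((pvKids D v).countP (fun n => decide (pvCell n = c))) with hz | hp
    · rw [hz] at h; simp at h
    · exact hp
  obtain ⟨n, hn, hcell⟩ := List.countP_pos_iff.mp hpos
  have hok := List.of_mem_filter hn
  rw [pvOK_iff] at hok
  simp at hcell
  exact hcell ▸ hok.2.2

lemma pvKC_three (D : Nat → Int) (v : Int) (c : Nat) :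
    pvKC D v c
      = (if pvOK D (v-1) = true ∧ pvCell (v-1) = c then 1 else 0)
        + (if pvOK D (v+1) = true ∧ pvCell (v+1) = c then 1 else 0)
        + (if pvOK D (2*v) = true ∧ pvCell (2*v) = c then 1 else 0) := by
  unfold pvKC pvKids
  by_cases o1 : pvOK D (v-1) = true <;> by_cases o2 : pvOK D (v+1) = true <;>
    by_cases o3 : pvOK D (2*v) = true <;>
    simp [List.filter, o1, o2, o3, List.countP_cons, List.countP_nil,
      Bool.not_eq_true] at * <;>
    split_ifs <;> push_cast <;> ring

-- one candidate move of A, against the abstract mid-layer state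
lemma pvAstep (D C : Nat → Int) (h : Nat → Int) (d end_ cur : Int)
    (dp : Array (Int × Int)) (rb : List Int) (i : Int)
    (hdp : pvDPinv dp (pvMid D C h d)) (hctx : pvCtx D C d) (hh : pvHyp h D)
    (htok : pvTok D d cur) (hend : -100001 ≤ end_ ∧ end_ < 100001)
    (hE : D (pvCell end_) = 0 ∨ D (pvCell end_) = d) :
    ∃ dp', pvAexpand end_ cur (dp, rb) i
        = (dp', (if pvOK D (cur + i) then [cur + i] else []) ++ rb)
      ∧ pvDPinv dp'
          (pvMid D C (fun c => h c + (if pvOK D (cur + i) = true ∧ pvCell (cur + i) = c then 1 else 0)) d) := by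
  obtain ⟨hd1, hDle, hzero, hCpos⟩ := hctx
  obtain ⟨hsz, hget⟩ := hdp
  obtain ⟨hpos, hfresh⟩ := hh
  have hcEnd : pvCell end_ < 100001 := pvCell_lt _ hend.1 hend.2
  have hcCur : pvCell cur < 100001 := pvCell_lt _ htok.1 htok.2.1
  have hhCur : h (pvCell cur) = 0 := by
    by_contra hc
    have := hfresh _ hc
    rw [htok.2.2] at this; omega
  have hgetCur : dp.getD (pvCell cur) (0,0) = (d, C (pvCell cur)) := by
    rw [hget _ hcCur]; unfold pvMid; rw [hhCur]; simp [htok.2.2]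
  have hprune : ¬ ((dp.getD (pvCell end_) (0,0)).1 ≠ 0 ∧
      (dp.getD (pvCell end_) (0,0)).1 < (dp.getD (pvCell cur) (0,0)).1) := by
    rw [hget _ hcEnd, hgetCur]; unfold pvMid
    by_cases hc : h (pvCell end_) ≠ 0
    · simp only [hc, if_pos]; omega
    · simp only [hc, if_neg]
      rcases hE with hE | hE <;> rw [hE] <;> simp <;> omega
  by_cases hok : pvOK D (cur + i) = true
  · -- a fresh in-range child: updated and appended
    obtain ⟨hn0, hnM, hnD⟩ := (pvOK_iff D (cur + i)).mp hok
    have hcNew : pvCell (cur + i) < 100001 := pvCell_lt _ (by omega) hnM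
    have hgetNew : dp.getD (pvCell (cur + i)) (0,0)
        = (if h (pvCell (cur + i)) ≠ 0 then d + 1 else 0, h (pvCell (cur + i))) := by
      rw [hget _ hcNew]; unfold pvMid
      rw [hnD, (hzero _).mp hnD]; simp
    have hcond : (dp.getD (pvCell (cur + i)) (0,0)).2 = 0 ∨
        (dp.getD (pvCell (cur + i)) (0,0)).1 = (dp.getD (pvCell cur) (0,0)).1 + 1 := by
      rw [hgetNew, hgetCur]
      by_cases hc : h (pvCell (cur + i)) ≠ 0
      · right; simp [hc]
      · left; simp at hc; simp [hc]
    have hcnd : 0 ≤ cur + i ∧ cur + i < 100001 ∧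
        ((dp.getD (pvCell (cur+i)) (0,0)).2 = 0 ∨
         (dp.getD (pvCell (cur+i)) (0,0)).1 = (dp.getD (pvCell cur) (0,0)).1 + 1) :=
      ⟨hn0, hnM, hcond⟩
    refine ⟨dp.setIfInBounds (pvCell (cur + i)) (d + 1, h (pvCell (cur + i)) + 1), ?_, ?_⟩
    · show pvAexpand end_ cur (dp, rb) i = _
      simp only [pvAexpand]
      rw [if_neg hprune, if_pos hcnd, hgetCur, hgetNew]
      simp [hok]
    · constructor
      · simpa [Array.size_setIfInBounds] using hsz
      · intro c hc
        by_cases hceq : pvCell (cur + i) = c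
        · subst hceq
          rw [pv_getD_set_self _ _ _ _ (by rw [hsz]; exact hcNew)]
          unfold pvMid
          beta_reduce
          have hge := hpos (pvCell (cur + i))
          rw [if_pos (⟨hok, rfl⟩ : pvOK D (cur + i) = true ∧ pvCell (cur + i) = pvCell (cur + i))]
          have hne : h (pvCell (cur + i)) + 1 ≠ 0 := by omega
          rw [if_pos hne, (hzero _).mp hnD]
          simp
        · rw [pv_getD_set_ne _ _ _ _ _ hceq, hget _ hc]
          unfold pvMid
          simp [hceq]
  · -- skipped candidate (out of range, or already discovered before this layer)
    refine ⟨dp, ?_, ?_⟩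
    · unfold pvAexpand
      simp only [hok, Bool.false_eq_true, if_false, List.nil_append]
      by_cases hpr : ((dp.getD (pvCell end_) (0,0)).1 ≠ 0 ∧
          (dp.getD (pvCell end_) (0,0)).1 < (dp.getD (pvCell cur) (0,0)).1)
      · exact absurd hpr hprune
      · simp only [if_neg hpr]
        rw [if_neg]
        intro ⟨hn0, hnM, hcond⟩
        have hcNew : pvCell (cur + i) < 100001 := pvCell_lt _ (by omega) hnM
        have hnD : D (pvCell (cur + i)) ≠ 0 := by
          intro hDz
          exact hok ((pvOK_iff D (cur + i)).mpr ⟨hn0, hnM, hDz⟩)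
        have hhNew : h (pvCell (cur + i)) = 0 := by
          by_contra hc; exact hnD (hfresh _ hc)
        have hgetNew : dp.getD (pvCell (cur + i)) (0,0)
            = (D (pvCell (cur + i)), C (pvCell (cur + i))) := by
          rw [hget _ hcNew]; unfold pvMid; rw [hhNew]; simp
        rw [hgetNew, hgetCur] at hcond
        rcases hcond with hc | hc
        · exact ((hzero _).not.mp hnD) (by simpa using hc)
        · have := (hDle (pvCell (cur + i))).2; simp at hc; omega
    · apply pvDPinv_congr _ (pvMid D C h d)
      · intro c hc; unfold pvMid; simp [hok]
      · exact ⟨hsz, hget⟩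

lemma pvHyp_ind (h D : Nat → Int) (hh : pvHyp h D) (n : Int) :
    pvHyp (fun c => h c + if pvOK D n = true ∧ pvCell n = c then 1 else 0) D := by
  constructor
  · intro c; have := hh.1 c; beta_reduce; split_ifs <;> omega
  · intro c hc
    by_cases hcc : pvOK D n = true ∧ pvCell n = c
    · obtain ⟨hokn, hcell⟩ := hcc
      exact hcell ▸ ((pvOK_iff D n).mp hokn).2.2
    · simp only [if_neg hcc, add_zero] at hc
      exact hh.2 c hc

-- processing one token of the current layer
lemma pvAtoken (D C : Nat → Int) (h : Nat → Int) (d end_ cur : Int)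
    (dp : Array (Int × Int)) (rb : List Int)
    (hdp : pvDPinv dp (pvMid D C h d)) (hctx : pvCtx D C d) (hh : pvHyp h D)
    (htok : pvTok D d cur) (hend : -100001 ≤ end_ ∧ end_ < 100001)
    (hE : D (pvCell end_) = 0 ∨ D (pvCell end_) = d) :
    ∃ dp', List.foldl (pvAexpand end_ cur) (dp, rb) [(-1 : Int), 1, cur]
        = (dp', (pvKids D cur).reverse ++ rb)
      ∧ pvDPinv dp' (pvMid D C (fun c => h c + pvKC D cur c) d) := by
  obtain ⟨dp1, heq1, hdp1⟩ := pvAstep D C h d end_ cur dp rb (-1) hdp hctx hh htok hend hE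
  have hh1 := pvHyp_ind h D hh (cur + -1)
  obtain ⟨dp2, heq2, hdp2⟩ := pvAstep D C _ d end_ cur dp1 _ 1 hdp1 hctx hh1 htok hend hE
  have hh2 := pvHyp_ind _ D hh1 (cur + 1)
  obtain ⟨dp3, heq3, hdp3⟩ := pvAstep D C _ d end_ cur dp2 _ cur hdp2 hctx hh2 htok hend hE
  have e1 : cur + -1 = cur - 1 := by ring
  have e3 : cur + cur = 2 * cur := by ring
  refine ⟨dp3, ?_, ?_⟩
  · simp only [List.foldl_cons, List.foldl_nil]
    rw [heq1, heq2, heq3]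
    simp only [e1, e3]
    by_cases o1 : pvOK D (cur - 1) = true <;> by_cases o2 : pvOK D (cur + 1) = true <;>
      by_cases o3 : pvOK D (2*cur) = true <;>
      simp [pvKids, List.filter, o1, o2, o3]
  · apply pvDPinv_congr _ _ _ ?_ hdp3
    intro c hc
    unfold pvMid
    beta_reduce
    simp only [e1, e3]
    rw [show (((h c + if pvOK D (cur - 1) = true ∧ pvCell (cur - 1) = c then (1:Int) else 0)
          + if pvOK D (cur + 1) = true ∧ pvCell (cur + 1) = c then 1 else 0)
          + if pvOK D (2*cur) = true ∧ pvCell (2*cur) = c then 1 else 0)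
        = h c + pvKC D cur c from by rw [pvKC_three]; ring]

lemma pvHyp_kC (h D : Nat → Int) (hh : pvHyp h D) (v : Int) :
    pvHyp (fun c => h c + pvKC D v c) D := by
  constructor
  · intro c; have h1 := hh.1 c; have h2 := pvKC_nonneg D v c; beta_reduce; omega
  · intro c hc
    beta_reduce at hc
    by_cases hk : pvKC D v c = 0
    · rw [hk, add_zero] at hc; exact hh.2 c hc
    · exact pvKC_fresh D v c hk

-- processing a whole layer of tokens
lemma pvAchunk (D C : Nat → Int) (d end_ : Int)
    (hctx : pvCtx D C d) (hend : -100001 ≤ end_ ∧ end_ < 100001)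
    (hE : D (pvCell end_) = 0 ∨ D (pvCell end_) = d) :
    ∀ (T : List Int) (f : Nat) (rb : List Int) (dp : Array (Int × Int)) (h : Nat → Int),
    pvDPinv dp (pvMid D C h d) → pvHyp h D → (∀ v ∈ T, pvTok D d v) → T.length ≤ f →
    ∃ dp', pvAloop f end_ T rb dp
        = pvAloop (f - T.length) end_ [] ((pvFlat D T).reverse ++ rb) dp'
      ∧ pvDPinv dp' (pvMid D C (fun c => h c + pvHCnt D T c) d) := by
  intro T
  induction T with
  | nil =>
    intro f rb dp h hdp hh _ _
    refine ⟨dp, ?_, ?_⟩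
    · simp [pvFlat]
    · apply pvDPinv_congr _ _ _ ?_ hdp
      intro c hc
      have hz : pvHCnt D [] c = 0 := by simp [pvHCnt, pvFlat]
      unfold pvMid
      beta_reduce
      rw [hz, add_zero]
  | cons cur T ih =>
    intro f rb dp h hdp hh htoks hlen
    match f with
    | 0 => simp at hlen
    | f + 1 =>
      obtain ⟨dp1, heq1, hdp1⟩ :=
        pvAtoken D C h d end_ cur dp rb hdp hctx hh (htoks cur (List.mem_cons_self)) hend hE
      have hh1 := pvHyp_kC h D hh cur
      obtain ⟨dp', heq', hdp'⟩ := ih f ((pvKids D cur).reverse ++ rb) dp1 _ hdp1 hh1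
        (fun v hv => htoks v (List.mem_cons_of_mem _ hv)) (by simpa using hlen)
      refine ⟨dp', ?_, ?_⟩
      · rw [pvAloop]
        simp only [heq1]
        rw [heq']
        have harith : f - T.length = (f + 1) - (cur :: T).length := by
          simp [List.length_cons]
        rw [harith]
        have hflat : (pvFlat D (cur :: T)).reverse = (pvFlat D T).reverse ++ (pvKids D cur).reverse := by
          simp [pvFlat, List.flatMap_cons]
        rw [hflat, List.append_assoc]
      · apply pvDPinv_congr _ _ _ ?_ hdp'
        intro c hc
        have : pvHCnt D (cur :: T) c = pvKC D cur c + pvHCnt D T c := by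
          simp only [pvHCnt, pvFlat, pvKC, List.flatMap_cons, List.countP_append]
          push_cast; ring
        unfold pvMid
        beta_reduce
        rw [this, add_assoc]

-- draining the final (pruned) layer: every token is skipped
lemma pvAdrain (F4 : Nat → Int × Int) (end_ : Int)
    (hend : -100001 ≤ end_ ∧ end_ < 100001)
    (hE : (F4 (pvCell end_)).1 ≠ 0) :
    ∀ (T : List Int) (f : Nat) (dp : Array (Int × Int)),
    pvDPinv dp F4 →
    (∀ v ∈ T, -100001 ≤ v ∧ v < 100001 ∧ (F4 (pvCell end_)).1 < (F4 (pvCell v)).1) →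
    T.length ≤ f →
    pvAloop f end_ T [] dp = dp := by
  intro T
  induction T with
  | nil => intro f dp _ _ _; exact pvAloop_nil f end_ dp
  | cons cur T ih =>
    intro f dp hdp htoks hlen
    match f with
    | 0 => simp at hlen
    | f + 1 =>
      have hcEnd : pvCell end_ < 100001 := pvCell_lt _ hend.1 hend.2
      have hcur := htoks cur List.mem_cons_self
      have hcCur : pvCell cur < 100001 := pvCell_lt _ hcur.1 hcur.2.1
      have hprune : ((dp.getD (pvCell end_) (0,0)).1 ≠ 0 ∧
          (dp.getD (pvCell end_) (0,0)).1 < (dp.getD (pvCell cur) (0,0)).1) := by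
        rw [hdp.2 _ hcEnd, hdp.2 _ hcCur]
        exact ⟨hE, hcur.2.2⟩
      have hstep : ∀ i, pvAexpand end_ cur (dp, ([] : List Int)) i = (dp, []) := by
        intro i
        show pvAexpand end_ cur (dp, []) i = (dp, [])
        simp only [pvAexpand]
        rw [if_pos hprune]
      rw [pvAloop]
      simp only [List.foldl_cons, List.foldl_nil, hstep]
      exact ih f dp hdp (fun v hv => htoks v (List.mem_cons_of_mem _ hv)) (by simpa using hlen)

lemma pvRnx_congr (D : Nat → Int) (h1 h2 : Nat → Int) (l : List Int)
    (he : ∀ c, h1 c = h2 c) (hr : pvRnx D h1 l) : pvRnx D h2 l := by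
  refine ⟨hr.1, fun u => ?_⟩
  rw [hr.2 u, he]

lemma pvHyp_wind (h D : Nat → Int) (hh : pvHyp h D) (w : Int) (hw : 0 ≤ w) (n : Int) :
    pvHyp (fun c => h c + w * (if pvOK D n = true ∧ pvCell n = c then 1 else 0)) D := by
  constructor
  · intro c; have := hh.1 c; beta_reduce; split_ifs <;> nlinarith
  · intro c hc
    beta_reduce at hc
    by_cases hcc : pvOK D n = true ∧ pvCell n = c
    · exact hcc.2 ▸ ((pvOK_iff D n).mp hcc.1).2.2
    · rw [if_neg hcc, mul_zero, add_zero] at hc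
      exact hh.2 c hc

-- B: one candidate move of one frontier node
lemma pvBcand (D C : Nat → Int) (h : Nat → Int) (d v n : Int)
    (dist cnt : Array Int) (rnxt : List Int)
    (hB : pvBinv dist cnt (pvMid D C h d)) (hctx : pvCtx D C d) (hh : pvHyp h D)
    (htok : pvTok D d v) (hr : pvRnx D h rnxt) :
    ∃ dist' cnt' rnxt', pvBinner d v (dist, cnt, rnxt) n = (dist', cnt', rnxt')
      ∧ pvBinv dist' cnt'
          (pvMid D C (fun c => h c + C (pvCell v) * (if pvOK D n = true ∧ pvCell n = c then 1 else 0)) d)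
      ∧ pvRnx D (fun c => h c + C (pvCell v) * (if pvOK D n = true ∧ pvCell n = c then 1 else 0)) rnxt' := by
  obtain ⟨hd1, hDle, hzero, hCpos⟩ := hctx
  obtain ⟨hsz1, hsz2, hget⟩ := hB
  obtain ⟨hpos, hfresh⟩ := hh
  have hcV : pvCell v < 100001 := pvCell_lt _ htok.1 htok.2.1
  have hhV : h (pvCell v) = 0 := by
    by_contra hc
    have := hfresh _ hc
    rw [htok.2.2] at this; omega
  have hgetV : (dist.getD (pvCell v) 0, cnt.getD (pvCell v) 0) = (d, C (pvCell v)) := by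
    rw [hget _ hcV]; unfold pvMid; rw [hhV]; simp [htok.2.2]
  have hw1 : 1 ≤ C (pvCell v) := by
    have hne : C (pvCell v) ≠ 0 := by
      intro hc
      have := (hzero (pvCell v)).mpr hc
      rw [htok.2.2] at this; omega
    have := hCpos (pvCell v)
    omega
  by_cases hok : pvOK D n = true
  · obtain ⟨hn0, hnM, hnD⟩ := (pvOK_iff D n).mp hok
    have hcN : pvCell n < 100001 := pvCell_lt _ (by omega) hnM
    have hCn : C (pvCell n) = 0 := (hzero _).mp hnD
    have hgetN : (dist.getD (pvCell n) 0, cnt.getD (pvCell n) 0)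
        = (if h (pvCell n) ≠ 0 then d + 1 else 0, h (pvCell n)) := by
      rw [hget _ hcN]; unfold pvMid; rw [hnD, hCn]; simp
    have hdN : dist.getD (pvCell n) 0 = if h (pvCell n) ≠ 0 then d + 1 else 0 :=
      congrArg Prod.fst hgetN
    have hcntN : cnt.getD (pvCell n) 0 = h (pvCell n) := congrArg Prod.snd hgetN
    have hcntV : cnt.getD (pvCell v) 0 = C (pvCell v) := congrArg Prod.snd hgetV
    by_cases hhz : h (pvCell n) = 0
    · -- first hit of a fresh cell: discovery
      have hCv1 : C (pvCell v) * (if pvOK D n = true ∧ pvCell n = pvCell n then (1:Int) else 0)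
          = C (pvCell v) := by simp [hok]
      refine ⟨dist.setIfInBounds (pvCell n) (d+1),
        cnt.setIfInBounds (pvCell n) (C (pvCell v)), n :: rnxt, ?_, ?_, ?_⟩
      · simp only [pvBinner]
        rw [if_pos (⟨hn0, hnM⟩ : 0 ≤ n ∧ n < 100001)]
        rw [hdN, if_neg (by simp [hhz] : ¬ h (pvCell n) ≠ 0)]
        rw [if_pos rfl, hcntV]
      · refine ⟨by simpa [Array.size_setIfInBounds] using hsz1,
          by simpa [Array.size_setIfInBounds] using hsz2, ?_⟩
        intro c hc
        by_cases hceq : pvCell n = c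
        · subst hceq
          rw [pv_getD_set_self' _ _ _ _ (by rw [hsz1]; exact hcN),
              pv_getD_set_self' _ _ _ _ (by rw [hsz2]; exact hcN)]
          unfold pvMid
          beta_reduce
          rw [hCv1, hhz, zero_add]
          rw [if_pos (by omega : C (pvCell v) ≠ 0), hCn]
          simp
        · rw [pv_getD_set_ne' _ _ _ _ _ hceq, pv_getD_set_ne' _ _ _ _ _ hceq, hget _ hc]
          unfold pvMid
          beta_reduce
          have hind0 : (if pvOK D n = true ∧ pvCell n = c then (1:Int) else 0) = 0 :=
            if_neg (fun hx => hceq hx.2)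
          rw [hind0, mul_zero, add_zero]
      · constructor
        · refine List.nodup_cons.mpr ⟨?_, hr.1⟩
          intro hmem
          exact ((hr.2 n).mp hmem).2.2.2 hhz
        · intro u
          rw [List.mem_cons, hr.2 u]
          beta_reduce
          constructor
          · rintro (rfl | ⟨hu1, hu2, hu3, hu4⟩)
            · refine ⟨hn0, hnM, hnD, ?_⟩
              rw [hhz, zero_add, if_pos ⟨hok, rfl⟩, mul_one]; omega
            · refine ⟨hu1, hu2, hu3, ?_⟩
              have hih := hpos (pvCell u)
              have : (0:Int) ≤ C (pvCell v) * (if pvOK D n = true ∧ pvCell n = pvCell u then 1 else 0) := by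
                split_ifs <;> nlinarith
              omega
          · rintro ⟨hu1, hu2, hu3, hu4⟩
            by_cases hcel : pvCell n = pvCell u
            · left; exact (pvCell_inj n u hn0 hu1 hcel).symm
            · right
              refine ⟨hu1, hu2, hu3, ?_⟩
              rw [if_neg (fun hx => hcel hx.2), mul_zero, add_zero] at hu4
              exact hu4
    · -- repeat hit within the layer: accumulate
      have hCv1 : C (pvCell v) * (if pvOK D n = true ∧ pvCell n = pvCell n then (1:Int) else 0)
          = C (pvCell v) := by simp [hok]
      refine ⟨dist, cnt.setIfInBounds (pvCell n) (h (pvCell n) + C (pvCell v)), rnxt, ?_, ?_, ?_⟩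
      · simp only [pvBinner]
        rw [if_pos (⟨hn0, hnM⟩ : 0 ≤ n ∧ n < 100001)]
        rw [hdN, if_pos hhz]
        rw [if_neg (by omega : ¬ (d+1 : Int) = 0), if_pos rfl, hcntN, hcntV]
      · refine ⟨hsz1, by simpa [Array.size_setIfInBounds] using hsz2, ?_⟩
        intro c hc
        by_cases hceq : pvCell n = c
        · subst hceq
          rw [pv_getD_set_self' _ _ _ _ (by rw [hsz2]; exact hcN), hdN, if_pos hhz]
          unfold pvMid
          beta_reduce
          rw [hCv1]
          have := hpos (pvCell n)
          rw [if_pos (by omega : h (pvCell n) + C (pvCell v) ≠ 0), hCn]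
          simp
        · rw [pv_getD_set_ne' _ _ _ _ _ hceq, hget _ hc]
          unfold pvMid
          beta_reduce
          have hind0 : (if pvOK D n = true ∧ pvCell n = c then (1:Int) else 0) = 0 :=
            if_neg (fun hx => hceq hx.2)
          rw [hind0, mul_zero, add_zero]
      · refine ⟨hr.1, fun u => ?_⟩
        rw [hr.2 u]
        beta_reduce
        constructor
        · rintro ⟨hu1, hu2, hu3, hu4⟩
          refine ⟨hu1, hu2, hu3, ?_⟩
          have hih := hpos (pvCell u)
          have : (0:Int) ≤ C (pvCell v) * (if pvOK D n = true ∧ pvCell n = pvCell u then 1 else 0) := by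
            split_ifs <;> nlinarith
          omega
        · rintro ⟨hu1, hu2, hu3, hu4⟩
          refine ⟨hu1, hu2, hu3, ?_⟩
          by_cases hcel : pvCell n = pvCell u
          · rw [← hcel]
            exact hhz
          · rw [if_neg (fun hx => hcel hx.2), mul_zero, add_zero] at hu4
            exact hu4
  · -- skipped candidate: out of range or already discovered in an earlier layer
    have hind : ∀ c, C (pvCell v) * (if pvOK D n = true ∧ pvCell n = c then (1:Int) else 0) = 0 := by
      intro c; rw [if_neg (fun hx => hok hx.1), mul_zero]
    refine ⟨dist, cnt, rnxt, ?_, ?_, ?_⟩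
    · simp only [pvBinner]
      by_cases hrange : 0 ≤ n ∧ n < 100001
      · rw [if_pos hrange]
        have hcN : pvCell n < 100001 := pvCell_lt _ (by omega) hrange.2
        have hnD : D (pvCell n) ≠ 0 := fun hDz => hok ((pvOK_iff D n).mpr ⟨hrange.1, hrange.2, hDz⟩)
        have hhN : h (pvCell n) = 0 := by
          by_contra hc; exact hnD (hfresh _ hc)
        have hdN : dist.getD (pvCell n) 0 = D (pvCell n) := by
          have := hget _ hcN
          unfold pvMid at this
          rw [hhN] at this
          simpa using congrArg Prod.fst this
        rw [hdN, if_neg hnD, if_neg (by have := (hDle (pvCell n)).2; omega : ¬ D (pvCell n) = d + 1)]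
      · rw [if_neg hrange]
    · apply pvBinv_congr _ _ (pvMid D C h d)
      · intro c hc; unfold pvMid; beta_reduce; rw [hind c, add_zero]
      · exact ⟨hsz1, hsz2, hget⟩
    · apply pvRnx_congr D h
      · intro c; rw [hind c, add_zero]
      · exact hr

-- B: one frontier node
lemma pvBnode (D C : Nat → Int) (h : Nat → Int) (d v : Int)
    (dist cnt : Array Int) (rnxt : List Int)
    (hB : pvBinv dist cnt (pvMid D C h d)) (hctx : pvCtx D C d) (hh : pvHyp h D)
    (htok : pvTok D d v) (hr : pvRnx D h rnxt) :
    ∃ dist' cnt' rnxt', pvBstep d (dist, cnt, rnxt) v = (dist', cnt', rnxt')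
      ∧ pvBinv dist' cnt' (pvMid D C (fun c => h c + C (pvCell v) * pvKC D v c) d)
      ∧ pvRnx D (fun c => h c + C (pvCell v) * pvKC D v c) rnxt'
      ∧ pvHyp (fun c => h c + C (pvCell v) * pvKC D v c) D := by
  have hw0 : 0 ≤ C (pvCell v) := hctx.2.2.2 (pvCell v)
  obtain ⟨dist1, cnt1, rnxt1, he1, hB1, hr1⟩ :=
    pvBcand D C h d v (v - 1) dist cnt rnxt hB hctx hh htok hr
  have hh1 := pvHyp_wind h D hh (C (pvCell v)) hw0 (v - 1)
  obtain ⟨dist2, cnt2, rnxt2, he2, hB2, hr2⟩ :=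
    pvBcand D C _ d v (v + 1) dist1 cnt1 rnxt1 hB1 hctx hh1 htok hr1
  have hh2 := pvHyp_wind _ D hh1 (C (pvCell v)) hw0 (v + 1)
  obtain ⟨dist3, cnt3, rnxt3, he3, hB3, hr3⟩ :=
    pvBcand D C _ d v (2 * v) dist2 cnt2 rnxt2 hB2 hctx hh2 htok hr2
  have hh3 := pvHyp_wind _ D hh2 (C (pvCell v)) hw0 (2 * v)
  have hsum : ∀ c, (((h c + C (pvCell v) * if pvOK D (v - 1) = true ∧ pvCell (v - 1) = c then 1 else 0)
        + C (pvCell v) * if pvOK D (v + 1) = true ∧ pvCell (v + 1) = c then 1 else 0)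
        + C (pvCell v) * if pvOK D (2 * v) = true ∧ pvCell (2 * v) = c then 1 else 0)
      = h c + C (pvCell v) * pvKC D v c := by
    intro c; rw [pvKC_three]; ring
  refine ⟨dist3, cnt3, rnxt3, ?_, ?_, ?_, ?_⟩
  · show List.foldl (pvBinner d v) (dist, cnt, rnxt) [v - 1, v + 1, 2 * v] = _
    simp only [List.foldl_cons, List.foldl_nil]
    rw [he1, he2, he3]
  · apply pvBinv_congr _ _ _ _ (fun c hc => ?_) hB3
    unfold pvMid; beta_reduce; rw [hsum c]
  · apply pvRnx_congr D _ _ _ (fun c => ?_) hr3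
    beta_reduce; rw [hsum c]
  · constructor
    · intro c; have := hh3.1 c; beta_reduce at this ⊢; rw [← hsum c]; exact this
    · intro c hc; beta_reduce at hc; rw [← hsum c] at hc; exact hh3.2 c hc

-- B: one whole layer
lemma pvBlayer (D C : Nat → Int) (d : Int) (hctx : pvCtx D C d) :
    ∀ (F : List Int) (dist cnt : Array Int) (rnxt : List Int) (h : Nat → Int),
    pvBinv dist cnt (pvMid D C h d) → pvHyp h D → (∀ v ∈ F, pvTok D d v) → pvRnx D h rnxt →
    ∃ dist' cnt' rnxt', List.foldl (pvBstep d) (dist, cnt, rnxt) F = (dist', cnt', rnxt')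
      ∧ pvBinv dist' cnt'
          (pvMid D C (fun c => h c + ((F.map (fun v => C (pvCell v) * pvKC D v c)).sum)) d)
      ∧ pvRnx D (fun c => h c + ((F.map (fun v => C (pvCell v) * pvKC D v c)).sum)) rnxt'
      ∧ pvHyp (fun c => h c + ((F.map (fun v => C (pvCell v) * pvKC D v c)).sum)) D := by
  intro F
  induction F with
  | nil =>
    intro dist cnt rnxt h hB hh _ hr
    refine ⟨dist, cnt, rnxt, by simp, ?_, ?_, ?_⟩
    · apply pvBinv_congr _ _ _ _ (fun c hc => ?_) hB
      unfold pvMid; beta_reduce; simp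
    · apply pvRnx_congr D _ _ _ (fun c => ?_) hr
      beta_reduce; simp
    · constructor
      · intro c; have := hh.1 c; beta_reduce; simp; omega
      · intro c hc; beta_reduce at hc; simp at hc; exact hh.2 c hc
  | cons v F ih =>
    intro dist cnt rnxt h hB hh htoks hr
    obtain ⟨dist1, cnt1, rnxt1, he1, hB1, hr1, hh1⟩ :=
      pvBnode D C h d v dist cnt rnxt hB hctx hh (htoks v List.mem_cons_self) hr
    obtain ⟨dist', cnt', rnxt', he', hB', hr', hh'⟩ :=
      ih dist1 cnt1 rnxt1 _ hB1 hh1 (fun u hu => htoks u (List.mem_cons_of_mem _ hu)) hr1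
    have hsum : ∀ c, ((h c + C (pvCell v) * pvKC D v c)
          + ((F.map (fun u => C (pvCell u) * pvKC D u c)).sum))
        = h c + (((v :: F).map (fun u => C (pvCell u) * pvKC D u c)).sum) := by
      intro c; simp only [List.map_cons, List.sum_cons]; ring
  
    refine ⟨dist', cnt', rnxt', ?_, ?_, ?_, ?_⟩
    · simp only [List.foldl_cons, he1, he']
    · apply pvBinv_congr _ _ _ _ (fun c hc => ?_) hB'
      unfold pvMid; beta_reduce; rw [hsum c]
    · apply pvRnx_congr D _ _ _ (fun c => ?_) hr'
      beta_reduce; rw [hsum c]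
    · constructor
      · intro c; have := hh'.1 c; beta_reduce at this ⊢; rw [← hsum c]; omega
      · intro c hc; beta_reduce at hc; rw [← hsum c] at hc; exact hh'.2 c hc

lemma pvHyp0 (D : Nat → Int) : pvHyp (fun _ => 0) D :=
  ⟨fun _ => le_refl 0, fun _ hc => absurd rfl hc⟩

lemma pvHCnt_nonneg (D : Nat → Int) (T : List Int) (c : Nat) : 0 ≤ pvHCnt D T c := by
  unfold pvHCnt; positivity

lemma pvFlat_mem (D : Nat → Int) (T : List Int) (u : Int) (hu : u ∈ pvFlat D T) :
    0 ≤ u ∧ u < 100001 ∧ D (pvCell u) = 0 ∧ pvHCnt D T (pvCell u) ≠ 0 := by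
  obtain ⟨v, hv, hk⟩ := List.mem_flatMap.mp hu
  have hok := (pvOK_iff D u).mp (List.of_mem_filter hk)
  refine ⟨hok.1, hok.2.1, hok.2.2, ?_⟩
  have hpos : 0 < (pvFlat D T).countP (fun n => decide (pvCell n = pvCell u)) :=
    List.countP_pos_iff.mpr ⟨u, hu, by simp⟩
  unfold pvHCnt
  have : (pvFlat D T).countP (fun n => decide (pvCell n = pvCell u)) ≠ 0 := by omega
  exact_mod_cast this

lemma pvHCnt_fresh (D : Nat → Int) (T : List Int) (c : Nat) (h : pvHCnt D T c ≠ 0) : D c = 0 := by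
  unfold pvHCnt at h
  have hpos : 0 < (pvFlat D T).countP (fun n => decide (pvCell n = c)) := by
    rcases Nat.eq_zero_or_pos ((pvFlat D T).countP (fun n => decide (pvCell n = c))) with hz | hp
    · rw [hz] at h; simp at h
    · exact hp
  obtain ⟨n, hn, hcell⟩ := List.countP_pos_iff.mp hpos
  simp at hcell
  exact hcell ▸ (pvFlat_mem D T n hn).2.2.1

lemma pvCount_cell (l : List Int) (hl : ∀ n ∈ l, 0 ≤ n ∧ n < 100001) (v : Int)
    (hv : 0 ≤ v ∧ v < 100001) :
    l.count v = l.countP (fun n => decide (pvCell n = pvCell v)) := by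
  rw [List.count_eq_countP]
  apply List.countP_congr
  intro n hn
  constructor
  · intro hb; simp at hb; subst hb; simp
  · intro hb
    simp at hb ⊢
    exact pvCell_inj n v (hl n hn).1 hv.1 hb

lemma pvUcount_le (D : Nat → Int) (k : Nat) (hk : k < 100001) (hD : D k ≠ 0) :
    pvUcount D ≤ 100000 := by
  unfold pvUcount
  have hsub : (List.range 100001).filter (fun c => decide (D c = 0)) ⊆ (List.range 100001).erase k := by
    intro c hc
    rw [List.mem_filter] at hc
    refine List.mem_erase_of_ne (fun he => ?_) |>.mpr hc.1
    subst he
    simp at hc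
    exact hD hc.2
  have hnd : ((List.range 100001).filter (fun c => decide (D c = 0))).Nodup :=
    List.Nodup.filter _ (List.nodup_range)
  have := (hnd.subperm hsub).length_le
  rw [List.length_erase_of_mem (List.mem_range.mpr hk), List.length_range] at this
  exact this

lemma pvUcount_drop (D D' : Nat → Int) (F' : List Int)
    (himp : ∀ c, D' c = 0 → D c = 0)
    (hmem : ∀ u ∈ F', 0 ≤ u ∧ u < 100001 ∧ D (pvCell u) = 0 ∧ D' (pvCell u) ≠ 0)
    (hnd : F'.Nodup) :
    pvUcount D' + F'.length ≤ pvUcount D := by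
  unfold pvUcount
  have hndL : (((List.range 100001).filter (fun c => decide (D' c = 0))) ++ F'.map pvCell).Nodup := by
    rw [List.nodup_append]
    refine ⟨List.Nodup.filter _ List.nodup_range, ?_, ?_⟩
    · exact List.Nodup.map_on
        (fun x hx y hy he => pvCell_inj x y (hmem x hx).1 (hmem y hy).1 he) hnd
    · intro a ha b hb
      rw [List.mem_filter] at ha
      obtain ⟨u, hu, rfl⟩ := List.mem_map.mp hb
      intro he
      subst he
      simp at ha
      exact (hmem u hu).2.2.2 ha.2
  have hsub : (((List.range 100001).filter (fun c => decide (D' c = 0))) ++ F'.map pvCell)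
      ⊆ (List.range 100001).filter (fun c => decide (D c = 0)) := by
    intro c hc
    rcases List.mem_append.mp hc with hc | hc
    · rw [List.mem_filter] at hc ⊢
      simp at hc ⊢
      exact ⟨hc.1, himp _ hc.2⟩
    · obtain ⟨u, hu, rfl⟩ := List.mem_map.mp hc
      rw [List.mem_filter]
      have := hmem u hu
      constructor
      · exact List.mem_range.mpr (pvCell_lt u (by omega) this.2.1)
      · simp [this.2.2.1]
  have := (hndL.subperm hsub).length_le
  rw [List.length_append, List.length_map] at this
  exact this

-- the main simulation: A's queue loop against B's layer loop
lemma pvMain : ∀ (bf : Nat) (l : Nat) (D C : Nat → Int) (F T : List Int)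
    (dpA : Array (Int × Int)) (dist cnt : Array Int) (af : Nat) (end_ : Int),
    1 ≤ l →
    pvCtx D C (l : Int) →
    (∀ v ∈ F, pvTok D (l : Int) v) →
    (∀ v, (T.count v : Int) = if v ∈ F then C (pvCell v) else 0) →
    F.Nodup →
    (∀ u ∈ F, ∀ w ∈ F, pvCell u = pvCell w → u = w) →
    (-100001 ≤ end_ ∧ end_ < 100001) →
    (D (pvCell end_) = 0 ∨ D (pvCell end_) = (l : Int)) →
    pvDPinv dpA (pvMid D C (fun _ => 0) (l : Int)) →
    pvBinv dist cnt (pvMid D C (fun _ => 0) (l : Int)) →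
    T.length ≤ 3^l →
    pvGeom l bf ≤ af →
    (F ≠ [] → pvUcount D + 2 ≤ bf) → 1 ≤ bf →
    [((pvAloop af end_ T [] dpA).getD (pvCell end_) (0,0)).1,
     ((pvAloop af end_ T [] dpA).getD (pvCell end_) (0,0)).2]
      = pvBloop bf end_ F (l : Int) dist cnt := by
  intro bf
  induction bf with
  | zero => intro _ _ _ _ _ _ _ _ _ _ _ _ _ _ _ _ _ _ _ _ _ hbf; omega
  | succ bf ih =>
    intro l D C F T dpA dist cnt af end_ hl hctx htoksF hcou hnd hcinj hend hE hdpA hBinv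
      hTlen hgeom hUc _
    have hcEnd : pvCell end_ < 100001 := pvCell_lt _ hend.1 hend.2
    have hmidEnd := hBinv.2.2 _ hcEnd
    have hdistEnd : dist.getD (pvCell end_) 0 = D (pvCell end_) := by
      have := congrArg Prod.fst hmidEnd
      simpa [pvMid] using this
    have hcntEnd : cnt.getD (pvCell end_) 0 = C (pvCell end_) := by
      have := congrArg Prod.snd hmidEnd
      simpa [pvMid] using this
    have hAEnd : dpA.getD (pvCell end_) (0,0) = (D (pvCell end_), C (pvCell end_)) := by
      rw [hdpA.2 _ hcEnd]; unfold pvMid; simp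
    have htoksT : ∀ v ∈ T, pvTok D (l : Int) v := by
      intro v hv
      have hc := hcou v
      by_cases hvF : v ∈ F
      · exact htoksF v hvF
      · rw [if_neg hvF] at hc
        have : 0 < T.count v := List.count_pos_iff.mpr hv
        omega
    have hafT : T.length ≤ af := by
      have h1 := pvGeom_ge l (bf+1)
      omega
    by_cases hF : F = []
    · -- frontier empty: queue empty too; both return the current cell values
      subst hF
      have hT : T = [] := by
        cases T with
        | nil => rfl
        | cons t T' =>
          have hc := hcou t
          simp at hc
          have : 0 < List.count t (t :: T') := List.count_pos_iff.mpr List.mem_cons_self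
          omega
      subst hT
      rw [pvAloop_nil, pvBloop]
      rw [hAEnd, hdistEnd, hcntEnd]
      simp
    · by_cases hDE : D (pvCell end_) = 0
      · -- coupled layer step (end not yet discovered at the top of this layer)
        obtain ⟨dist', cnt', rnxt', heB, hB', hr', hh'⟩ :=
          pvBlayer D C (l : Int) hctx F dist cnt [] (fun _ => 0) hBinv (pvHyp0 D) htoksF
            ⟨List.nodup_nil, fun u => by simp⟩
        obtain ⟨dp', heA, hdp'⟩ :=
          pvAchunk D C (l : Int) end_ hctx hend hE T af [] dpA (fun _ => 0) hdpA (pvHyp0 D)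
            htoksT hafT
        have hreg : ∀ c, ((F.map (fun v => C (pvCell v) * pvKC D v c)).sum) = pvHCnt D T c :=
          fun c => (pvRegroup D C T F c hnd hcou).symm
        set D' : Nat → Int := fun c => if pvHCnt D T c ≠ 0 then (l : Int) + 1 else D c with hD'
        set C' : Nat → Int := fun c => C c + pvHCnt D T c with hC'
        have hcast : (((l+1 : Nat)) : Int) = (l : Int) + 1 := by push_cast; ring
        have hmid' : ∀ c, c < 100001 →
            pvMid D C (fun c => 0 + pvHCnt D T c) (l : Int) c
              = pvMid D' C' (fun _ => 0) ((l+1 : Nat) : Int) c := by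
          intro c _
          unfold pvMid
          beta_reduce
          simp only [hD', hC', hcast]
          have hHp := pvHCnt_nonneg D T c
          by_cases hhc : pvHCnt D T c = 0
          · rw [hhc]; simp
          · rw [if_pos (by omega : (0:Int) + pvHCnt D T c ≠ 0), if_pos hhc,
              if_neg (by simp : ¬ (0:Int) ≠ 0)]
            rw [Prod.mk.injEq]
            exact ⟨rfl, by ring⟩
        have hdp'' : pvDPinv dp' (pvMid D' C' (fun _ => 0) ((l+1 : Nat) : Int)) :=
          pvDPinv_congr _ _ _ hmid' hdp'
        have hB'' : pvBinv dist' cnt' (pvMid D' C' (fun _ => 0) ((l+1 : Nat) : Int)) := by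
          apply pvBinv_congr _ _ _ _ (fun c hc => ?_) hB'
          have h0 : pvMid D C (fun c => 0 + (F.map (fun v => C (pvCell v) * pvKC D v c)).sum) (l:Int) c
              = pvMid D C (fun c => 0 + pvHCnt D T c) (l:Int) c := by
            unfold pvMid; beta_reduce; rw [hreg c]
          rw [h0]; exact hmid' c hc
        have hrF' : ∀ u, u ∈ rnxt'.reverse ↔
            (0 ≤ u ∧ u < 100001 ∧ D (pvCell u) = 0 ∧ pvHCnt D T (pvCell u) ≠ 0) := by
          intro u
          rw [List.mem_reverse, hr'.2 u]
          beta_reduce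
          rw [hreg (pvCell u)]
          simp
        have hF'nodup : rnxt'.reverse.Nodup := List.nodup_reverse.mpr hr'.1
        have htoksF' : ∀ u ∈ rnxt'.reverse, pvTok D' ((l+1 : Nat) : Int) u := by
          intro u hu
          obtain ⟨h1, h2, h3, h4⟩ := (hrF' u).mp hu
          refine ⟨by omega, h2, ?_⟩
          simp only [hD']
          rw [if_pos h4, hcast]
        have hcinj' : ∀ u ∈ rnxt'.reverse, ∀ w ∈ rnxt'.reverse, pvCell u = pvCell w → u = w := by
          intro u hu w hw he
          exact pvCell_inj u w ((hrF' u).mp hu).1 ((hrF' w).mp hw).1 he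
        have hcou' : ∀ v, ((pvFlat D T).count v : Int)
            = if v ∈ rnxt'.reverse then C' (pvCell v) else 0 := by
          intro v
          by_cases hrange : 0 ≤ v ∧ v < 100001
          · have hcc : ((pvFlat D T).count v : Int) = pvHCnt D T (pvCell v) := by
              unfold pvHCnt
              rw [pvCount_cell (pvFlat D T)
                (fun n hn => ⟨(pvFlat_mem D T n hn).1, (pvFlat_mem D T n hn).2.1⟩) v hrange]
            by_cases hvF : v ∈ rnxt'.reverse
            · obtain ⟨h1, h2, h3, h4⟩ := (hrF' v).mp hvF
              rw [if_pos hvF, hcc]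
              simp only [hC']
              rw [(hctx.2.2.1 _).mp h3, zero_add]
            · rw [if_neg hvF, hcc]
              by_cases hH : pvHCnt D T (pvCell v) = 0
              · rw [hH]
              · exact absurd ((hrF' v).mpr ⟨hrange.1, hrange.2, pvHCnt_fresh D T _ hH, hH⟩) hvF
          · have hnotin : v ∉ pvFlat D T := fun hmem =>
              hrange ⟨(pvFlat_mem D T v hmem).1, (pvFlat_mem D T v hmem).2.1⟩
            rw [List.count_eq_zero.mpr hnotin,
              if_neg (fun hvF => hrange ⟨((hrF' v).mp hvF).1, ((hrF' v).mp hvF).2.1⟩)]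
            simp
        have hE' : D' (pvCell end_) = 0 ∨ D' (pvCell end_) = ((l+1 : Nat) : Int) := by
          by_cases hH : pvHCnt D T (pvCell end_) ≠ 0
          · right; simp only [hD']; rw [if_pos hH, hcast]
          · left; simp only [hD']; rw [if_neg hH]; exact hDE
        have hctx' : pvCtx D' C' ((l+1 : Nat) : Int) := by
          refine ⟨by rw [hcast]; have := hctx.1; omega, ?_, ?_, ?_⟩
          · intro c
            simp only [hD']
            rw [hcast]
            have := hctx.2.1 c
            split_ifs <;> omega
          · intro c
            simp only [hD', hC']
            have hz := hctx.2.2.1 c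
            have hCp := hctx.2.2.2 c
            have hHp := pvHCnt_nonneg D T c
            split_ifs with hc
            · constructor
              · intro habs; exfalso; omega
              · intro habs; exfalso; omega
            · rw [not_not] at hc
              rw [hc, add_zero]
              exact hz
          · intro c
            simp only [hC']
            have := hctx.2.2.2 c
            have := pvHCnt_nonneg D T c
            omega
        have hUc' : rnxt'.reverse ≠ [] → pvUcount D' + 2 ≤ bf := by
          intro hFne
          have hbound := hUc hF
          have hdrop : pvUcount D' + rnxt'.reverse.length ≤ pvUcount D := by
            apply pvUcount_drop D D' rnxt'.reverse ?_ ?_ hF'nodup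
            · intro c hc
              simp only [hD'] at hc
              by_cases hH : pvHCnt D T c ≠ 0
              · rw [if_pos hH] at hc; exfalso; omega
              · rw [if_neg hH] at hc; exact hc
            · intro u hu
              obtain ⟨h1, h2, h3, h4⟩ := (hrF' u).mp hu
              refine ⟨h1, h2, h3, ?_⟩
              simp only [hD']
              rw [if_pos h4]
              omega
          have hlen1 : 1 ≤ rnxt'.reverse.length := List.length_pos_iff.mpr hFne
          omega
        have hbf1 : 1 ≤ bf := by
          have := hUc hF; omega
        have harithT : (pvFlat D T).length ≤ 3 ^ (l+1) := by
          have h1 := pvFlat_len D T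
          have h2 : (3:Nat)^(l+1) = 3 * 3^l := by rw [pow_succ]; ring
          omega
        have hgeom' : pvGeom (l+1) bf ≤ af - T.length := by
          rw [pvGeom_succ] at hgeom
          omega
        have hIH := ih (l+1) D' C' rnxt'.reverse (pvFlat D T) dp' dist' cnt' (af - T.length) end_
          (by omega) hctx' htoksF' hcou' hF'nodup hcinj' hend hE' hdp'' hB'' harithT hgeom'
          hUc' hbf1
        rw [hcast] at hIH
        rw [heA, pvAloop_flip, List.append_nil, List.reverse_reverse]
        rw [pvBloop]
        have hcondB : ¬ (F = [] ∨ ¬ dist.getD (pvCell end_) 0 = 0) := by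
          rintro (hc | hc)
          · exact hF hc
          · rw [hdistEnd] at hc; exact hc hDE
        rw [if_neg hcondB]
        simp only [heB]
        exact hIH
      · -- end discovered in the previous layer: B stops; A expands one more
        -- (pruned-irrelevant) layer and then drains the queue without touching the end cell
        have hDEl : D (pvCell end_) = (l : Int) := hE.resolve_left hDE
        obtain ⟨dp', heA, hdp'⟩ :=
          pvAchunk D C (l : Int) end_ hctx hend hE T af [] dpA (fun _ => 0) hdpA (pvHyp0 D)
            htoksT hafT
        have hHEnd : pvHCnt D T (pvCell end_) = 0 := by
          by_contra hc
          exact hDE (pvHCnt_fresh D T _ hc)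
        have hdrain : pvAloop (af - T.length) end_ (pvFlat D T) [] dp' = dp' := by
          apply pvAdrain (pvMid D C (fun c => 0 + pvHCnt D T c) (l : Int)) end_ hend ?_
            (pvFlat D T) (af - T.length) dp' hdp' ?_ ?_
          · unfold pvMid
            beta_reduce
            rw [hHEnd]
            rw [if_neg (by simp : ¬ ((0:Int) + 0 ≠ 0))]
            simp only [hDEl]
            intro hc
            omega
          · intro v hv
            obtain ⟨h1, h2, h3, h4⟩ := pvFlat_mem D T v hv
            refine ⟨by omega, h2, ?_⟩
            unfold pvMid
            beta_reduce
            rw [hHEnd]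
            have h5 := pvHCnt_nonneg D T (pvCell v)
            rw [if_pos (by omega : (0:Int) + pvHCnt D T (pvCell v) ≠ 0),
                if_neg (by simp : ¬ ((0:Int) + 0 ≠ 0))]
            simp only [hDEl]
            omega
          · have hg : 3^l + 3^(l+1) ≤ pvGeom l (bf+1) := by
              rw [pvGeom_succ]
              have := pvGeom_ge (l+1) bf
              omega
            have hfl : (pvFlat D T).length ≤ 3 * T.length := pvFlat_len D T
            have h2 : (3:Nat)^(l+1) = 3 * 3^l := by rw [pow_succ]; ring
            omega
        rw [heA, pvAloop_flip, List.append_nil, List.reverse_reverse, hdrain]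
        have hreadout : dp'.getD (pvCell end_) (0,0) = ((l : Int), C (pvCell end_)) := by
          rw [hdp'.2 _ hcEnd]
          unfold pvMid
          beta_reduce
          rw [hHEnd]
          rw [if_neg (by simp : ¬ ((0:Int) + 0 ≠ 0))]
          rw [hDEl]
          simp
        rw [hreadout, pvBloop]
        have hne : ¬ dist.getD (pvCell end_) 0 = 0 := by
          rw [hdistEnd, hDEl]
          intro hc
          omega
        rw [if_pos (Or.inr hne)]
        rw [hdistEnd, hcntEnd, hDEl]

-- ===== VERDICT (by name: the statement is the Claim_ definition above) =====
theorem BFS_spec : Claim_equal_BFS := by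
  intro start end_ _ hpre
  obtain ⟨hs1, hs2, he1, he2⟩ := hpre
  have hcsM : pvCell start < 100001 := pvCell_lt _ hs1 (by omega)
  set D0 : Nat → Int := fun c => if c = pvCell start then 1 else 0 with hD0
  have hone : ((1 : Nat) : Int) = 1 := by norm_num
  have hctx0 : pvCtx D0 D0 ((1 : Nat) : Int) := by
    refine ⟨by omega, ?_, fun c => Iff.rfl, ?_⟩
    · intro c; simp only [hD0, hone]; split_ifs <;> omega
    · intro c; simp only [hD0]; split_ifs <;> omega
  have htoks0 : ∀ v ∈ [start], pvTok D0 ((1 : Nat) : Int) v := by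
    intro v hv
    rw [List.mem_singleton] at hv
    subst hv
    exact ⟨hs1, by omega, by simp [hD0]⟩
  have hcou0 : ∀ v, (([start].count v : Int)) = if v ∈ [start] then D0 (pvCell v) else 0 := by
    intro v
    by_cases hv : v = start
    · subst hv
      rw [if_pos (List.mem_singleton.mpr rfl), List.count_singleton]
      simp [hD0]
    · have h1 : v ∉ [start] := by simp [hv]
      rw [if_neg h1, List.count_eq_zero.mpr h1]
      simp
  have hE0 : D0 (pvCell end_) = 0 ∨ D0 (pvCell end_) = ((1 : Nat) : Int) := by
    by_cases hc : pvCell end_ = pvCell start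
    · right; simp [hD0, hc]
    · left; simp only [hD0]; rw [if_neg hc]
  have hdpA0 : pvDPinv ((Array.replicate 100001 ((0 : Int), (0 : Int))).setIfInBounds
      (pvCell start) (1, 1)) (pvMid D0 D0 (fun _ => 0) ((1 : Nat) : Int)) := by
    constructor
    · simp
    · intro c hc
      by_cases hceq : pvCell start = c
      · subst hceq
        rw [pv_getD_set_self _ _ _ _ (by simpa using hcsM)]
        unfold pvMid
        simp [hD0]
      · rw [pv_getD_set_ne _ _ _ _ _ hceq]
        unfold pvMid
        have hceq' : ¬ c = pvCell start := fun he => hceq he.symm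
        simp [hD0, Array.getD_eq_getD_getElem?, hc, hceq']
  have hBinv0 : pvBinv ((Array.replicate 100001 (0 : Int)).setIfInBounds (pvCell start) 1)
      ((Array.replicate 100001 (0 : Int)).setIfInBounds (pvCell start) 1)
      (pvMid D0 D0 (fun _ => 0) ((1 : Nat) : Int)) := by
    refine ⟨by simp, by simp, ?_⟩
    intro c hc
    by_cases hceq : pvCell start = c
    · subst hceq
      rw [pv_getD_set_self' _ _ _ _ (by simpa using hcsM)]
      unfold pvMid
      simp [hD0]
    · rw [pv_getD_set_ne' _ _ _ _ _ hceq]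
      unfold pvMid
      have hceq' : ¬ c = pvCell start := fun he => hceq he.symm
      simp [hD0, Array.getD_eq_getD_getElem?, hc, hceq']
  have hgeom0 : pvGeom 1 100003 ≤ 1 <<< 200100 := by
    have hg := pvGeom_le 1 100003
    have h34 : (3:Nat)^(1+100003+1) ≤ 4^100005 := by
      have := Nat.pow_le_pow_left (by norm_num : (3:Nat) ≤ 4) 100005
      simpa using this
    have h4 : (4:Nat)^100005 = 2^200010 := by
      rw [show (4:Nat) = 2^2 from rfl, ← pow_mul]
    have h2 : (2:Nat)^200010 ≤ 2^200100 := Nat.pow_le_pow_right (by norm_num) (by norm_num)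
    rw [Nat.one_shiftLeft]
    omega
  have hUc0 : ([start] : List Int) ≠ [] → pvUcount D0 + 2 ≤ 100003 := by
    intro _
    have := pvUcount_le D0 (pvCell start) hcsM (by simp [hD0])
    omega
  have hM := pvMain 100003 1 D0 D0 [start] [start]
    ((Array.replicate 100001 ((0 : Int), (0 : Int))).setIfInBounds (pvCell start) (1, 1))
    ((Array.replicate 100001 (0 : Int)).setIfInBounds (pvCell start) 1)
    ((Array.replicate 100001 (0 : Int)).setIfInBounds (pvCell start) 1)
    (1 <<< 200100) end_ (by omega) hctx0 htoks0 hcou0 (by simp) 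
    (by intro u hu w hw _; rw [List.mem_singleton] at hu hw; rw [hu, hw])
    ⟨he1, by omega⟩ hE0 hdpA0 hBinv0 (by simp) hgeom0 hUc0 (by omega)
  rw [hone] at hM
  show BFS start end_ = BFS_alt start end_
  simp only [BFS, BFS_alt]
  exact hM
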